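-- pv_equiv track=rewrite | github.com/marianaaromero/fundamentos-de-programacion | TP2-fundapay/validaciones.py | validar_formato_dni
-- ===== SOURCE A (Python) =====
-- def validar_formato_dni(dni: str) -> bool:
--     """
--     Valida que el DNI cumpla con el formato XX.YYY.ZZZ y contenga
--     exactamente 8 dígitos numéricos.
--
--     Pre:
--         - `dni` es una cadena de texto.
--     Post:
--         - Devuelve True si `dni_str` tiene la longitud correcta (10 caracteres),
--           los puntos en las posiciones esperadas (2 y 6), y las partes numéricas
--           suman 8 dígitos en total.
--         - Devuelve False en cualquier otro caso.
--     """
--     if len(dni) != 10: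
--         return False
--
--     if dni[2] != "." or dni[6] != ".":
--         return False
--
--     partes = dni.split(".")
--     for parte in partes:
--         if not parte.isdigit():
--             return False
--
--     dni_numerico = "".join(partes)
--     if len(dni_numerico) != 8:
--         return False
--
--     return True
-- ===== SOURCE B (Python) =====
-- def validar_formato_dni(dni: str) -> bool:
--     if len(dni) != 10:
--         return False
--     for i, c in enumerate(dni):
--         if i in (2, 6):
--             if c != ".":
--                 return False
--         elif not c.isdigit():
--             return False
--     return True
-- ===== Notes on version B (the rewrite author's own statement) =====
-- stated objective: simpler
-- what changed: Replaced the split-into-parts / per-part isdigit loop / join-and-count-digits pipeline with a single indexed pass over the characters that requires a dot exactly at positions 2 and 6 and a digit everywhere else.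
import Mathlib
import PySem

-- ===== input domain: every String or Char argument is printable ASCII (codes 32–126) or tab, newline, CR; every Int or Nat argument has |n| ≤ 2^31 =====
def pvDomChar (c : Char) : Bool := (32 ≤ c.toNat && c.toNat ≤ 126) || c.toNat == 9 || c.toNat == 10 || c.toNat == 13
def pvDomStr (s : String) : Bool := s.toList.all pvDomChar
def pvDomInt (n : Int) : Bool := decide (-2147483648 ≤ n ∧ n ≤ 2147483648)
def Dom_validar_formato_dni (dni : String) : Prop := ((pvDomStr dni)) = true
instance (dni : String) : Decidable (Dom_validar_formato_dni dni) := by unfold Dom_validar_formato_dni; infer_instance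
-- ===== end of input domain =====

-- B replaces A's split / per-part isdigit loop / join-and-count pipeline by a single indexed pass over the characters (simpler).

-- ===== PORT A =====
def validar_formato_dni (dni : String) : Bool :=
  if PySem.Str.len dni ≠ 10 then false
  else if ¬ (PySem.Str.pyGet? dni 2 = some '.') ∨ ¬ (PySem.Str.pyGet? dni 6 = some '.') then false
  else
    let partes := (PySem.Str.split? dni ".").getD []
    if ¬ partes.all (fun parte => PySem.Str.strIsdigit parte) then false
    else
      let dni_numerico := PySem.Str.join "" partes
      if PySem.Str.len dni_numerico ≠ 8 then false
      else true

-- ===== PORT B =====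
def validar_formato_dni_alt (dni : String) : Bool :=
  if PySem.Str.len dni ≠ 10 then false
  else
    (PySem.List.enumerate dni.toList).all fun ic =>
      if ic.1 = 2 ∨ ic.1 = 6 then ic.2 == '.' else PySem.Chars.isdigit ic.2

-- ===== PRECONDITION & SPEC =====
def Spec_validar_formato_dni (dni : String) (out : Bool) : Prop := out = validar_formato_dni_alt dni
instance (dni : String) (out : Bool) : Decidable (Spec_validar_formato_dni dni out) := by unfold Spec_validar_formato_dni; infer_instance

-- ===== CLAIM (what is proved, stated in full; the proofs are below) =====
def Claim_equal_validar_formato_dni : Prop := ∀ (dni : String), Dom_validar_formato_dni dni → Spec_validar_formato_dni dni (validar_formato_dni dni)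

-- ===== LEMMAS AND PROOFS =====

-- A's dni.split(".") as a structural recursion: pieces of cs between the dots.
def fsplit (cs : List Char) : List (List Char) :=
  match cs with
  | [] => [[]]
  | c :: r => if c = '.' then [] :: fsplit r else (fsplit r).modifyHead (c :: ·)

theorem modifyHead_id' {α : Type} (l : List α) : List.modifyHead (fun x => x) l = l := by
  cases l <;> simp

theorem go_spec' (l : List Char) : ∀ (fuel : Nat) (cur : List Char) (acc : List (List Char)),
    l.length < fuel →
    PySem.Chars.splitOn.go ['.'] fuel l cur acc
      = acc.reverse ++ (fsplit l).modifyHead (cur.reverse ++ ·) := by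
  induction l with
  | nil =>
    intro fuel cur acc h
    match fuel, h with
    | (n+1), _ => simp [PySem.Chars.splitOn.go, fsplit]
  | cons c r ih =>
    intro fuel cur acc h
    obtain ⟨n, rfl⟩ : ∃ n, fuel = n + 1 := ⟨fuel - 1, by omega⟩
    have hn : r.length < n := by simpa using h
    by_cases hc : c = '.'
    · subst hc
      simp [PySem.Chars.splitOn.go, fsplit, ih n _ _ hn, modifyHead_id']
    · have hpre : List.isPrefixOf ['.'] (c :: r) = false := by
        simp [List.isPrefixOf]
        intro h'; exact hc h'.symm
      simp [PySem.Chars.splitOn.go, hpre, fsplit, hc, ih n _ _ hn,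
        List.modifyHead_modifyHead, Function.comp_def]

theorem splitOn_dot (cs : List Char) : PySem.Chars.splitOn cs ['.'] = fsplit cs := by
  have h := go_spec' cs (cs.length + 1) [] [] (by omega)
  simpa [PySem.Chars.splitOn, modifyHead_id'] using h

set_option maxHeartbeats 1000000 in
theorem key (c0 c1 c2 c3 c4 c5 c6 c7 c8 c9 : Char) (h2 : c2 = '.') (h6 : c6 = '.') :
    validar_formato_dni (String.ofList [c0,c1,c2,c3,c4,c5,c6,c7,c8,c9])
      = validar_formato_dni_alt (String.ofList [c0,c1,c2,c3,c4,c5,c6,c7,c8,c9]) := by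
  have hdot : ".".toList = ['.'] := rfl
  have hdig : PySem.Chars.isdigit '.' = false := by decide
  subst h2 h6
  by_cases hc0 : c0 = '.' <;> by_cases hc1 : c1 = '.' <;> by_cases hc3 : c3 = '.' <;>
  by_cases hc4 : c4 = '.' <;> by_cases hc5 : c5 = '.' <;> by_cases hc7 : c7 = '.' <;>
  by_cases hc8 : c8 = '.' <;> by_cases hc9 : c9 = '.' <;>
    simp [validar_formato_dni, validar_formato_dni_alt, PySem.Str.split?,
      PySem.Chars.split?, hdot, splitOn_dot, PySem.Str.join, PySem.Chars.join,
      PySem.Str.strIsdigit, PySem.Chars.strIsdigit, PySem.List.enumerate, PySem.Str.len,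
      PySem.Str.pyGet?, PySem.List.pyGet?, PySem.List.pyIdx?, fsplit, List.intercalate,
      List.intersperse, Bool.and_assoc, hc0, hc1, hc3, hc4, hc5, hc7, hc8, hc9, hdig]

theorem key_nodot (c0 c1 c2 c3 c4 c5 c6 c7 c8 c9 : Char) (h : ¬ (c2 = '.' ∧ c6 = '.')) :
    validar_formato_dni (String.ofList [c0,c1,c2,c3,c4,c5,c6,c7,c8,c9])
      = validar_formato_dni_alt (String.ofList [c0,c1,c2,c3,c4,c5,c6,c7,c8,c9]) := by
  by_cases h2 : c2 = '.' <;> by_cases h6 : c6 = '.' <;>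
    simp_all [validar_formato_dni, validar_formato_dni_alt, PySem.Str.len, PySem.Str.pyGet?,
      PySem.List.pyGet?, PySem.List.pyIdx?, PySem.List.enumerate]

theorem len_cases (dni : String) (h : dni.toList.length = 10) :
    validar_formato_dni dni = validar_formato_dni_alt dni := by
  have hs : dni = String.ofList dni.toList := by simp
  rw [hs]
  match dni.toList, h with
  | [c0,c1,c2,c3,c4,c5,c6,c7,c8,c9], _ =>
    by_cases hd : c2 = '.' ∧ c6 = '.'
    · exact key c0 c1 c2 c3 c4 c5 c6 c7 c8 c9 hd.1 hd.2
    · exact key_nodot c0 c1 c2 c3 c4 c5 c6 c7 c8 c9 hd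

-- ===== VERDICT (by name: the statement is the Claim_ definition above) =====
theorem validar_formato_dni_spec : Claim_equal_validar_formato_dni := by
  intro dni _
  unfold Spec_validar_formato_dni
  by_cases hlen : dni.toList.length = 10
  · exact len_cases dni hlen
  · have hlen' : PySem.Str.len dni ≠ 10 := by
      unfold PySem.Str.len
      exact_mod_cast hlen
    unfold validar_formato_dni validar_formato_dni_alt
    rw [if_pos hlen', if_pos hlen']
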